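-- pv_equiv track=rewrite | github.com/mae-kelly/new | neural_engine_brilliant.py | _looks_like_location
-- ===== SOURCE A (Python) =====
-- def _looks_like_location(val: str) -> bool:
--     location_keywords = [
--         'facility', 'dc', 'datacenter', 'aws', 'gcp', 'azure', 'us-', 'eu-',
--         'nyc', 'chicago', 'london', 'cloud', 'distributed', 'mobile', 'colo',
--         'tier3', 'zone-c', 'cage12', 'central1', 'east', 'west'
--     ]
--     val_lower = val.lower()
--     matches = sum(1 for keyword in location_keywords if keyword in val_lower)
--     return matches >= 1
-- ===== SOURCE B (Python) =====
-- def _looks_like_location(val: str) -> bool: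
--     location_keywords = [
--         'facility', 'dc', 'datacenter', 'aws', 'gcp', 'azure', 'us-', 'eu-',
--         'nyc', 'chicago', 'london', 'cloud', 'distributed', 'mobile', 'colo',
--         'tier3', 'zone-c', 'cage12', 'central1', 'east', 'west'
--     ]
--     s = val.lower()
--     for i in range(len(s)):
--         for keyword in location_keywords:
--             if s.startswith(keyword, i):
--                 return True
--     return False
-- ===== Notes on version B (the rewrite author's own statement) =====
-- stated objective: alternative
-- what changed: A scans the whole string once per keyword (21 substring searches) and counts matches; B makes a single left-to-right pass over positions, testing each keyword as a prefix at the current position and returning on the first hit.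
import Mathlib
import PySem

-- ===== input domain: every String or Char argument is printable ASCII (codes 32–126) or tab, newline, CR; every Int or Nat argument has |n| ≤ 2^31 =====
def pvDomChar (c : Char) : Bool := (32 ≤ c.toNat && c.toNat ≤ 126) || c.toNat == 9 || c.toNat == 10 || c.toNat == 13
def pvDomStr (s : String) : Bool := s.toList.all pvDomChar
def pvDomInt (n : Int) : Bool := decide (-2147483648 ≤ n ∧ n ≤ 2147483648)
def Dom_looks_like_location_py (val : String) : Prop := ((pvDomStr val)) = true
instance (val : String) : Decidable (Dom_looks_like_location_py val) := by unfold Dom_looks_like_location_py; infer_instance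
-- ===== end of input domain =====

-- B replaces A's per-keyword whole-string substring searches (counted, then compared to 1)
-- by a single left-to-right scan over positions that tests every keyword as a prefix and
-- returns on the first hit (objective: alternative).

-- ===== PORT A =====
-- the shared keyword list literal (data only, used by both ports)
def pvKeywords : List String :=
  ["facility", "dc", "datacenter", "aws", "gcp", "azure", "us-", "eu-",
   "nyc", "chicago", "london", "cloud", "distributed", "mobile", "colo",
   "tier3", "zone-c", "cage12", "central1", "east", "west"]

def looks_like_location_py (val : String) : Bool :=
  let val_lower := PySem.Str.lower val
  let nMatches : Int :=
    pvKeywords.foldl (fun acc keyword => if PySem.Str.isIn keyword val_lower then acc + 1 else acc) 0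
  decide (1 ≤ nMatches)

-- ===== PORT B =====
-- the outer 'for i in range(len(s))' loop: recursion over the suffixes of s;
-- the inner 'for keyword in …: if s.startswith(keyword, i): return True' is the .any
def pvScanLoc (kws : List (List Char)) : List Char → Bool
  | [] => false
  | c :: rest =>
      if kws.any (fun kw => PySem.Chars.startswith (c :: rest) kw) then true
      else pvScanLoc kws rest

def looks_like_location_py_alt (val : String) : Bool :=
  pvScanLoc (pvKeywords.map String.toList) (PySem.Str.lower val).toList

-- ===== PRECONDITION & SPEC =====
def Spec_looks_like_location_py (val : String) (out : Bool) : Prop := out = looks_like_location_py_alt val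
instance (val : String) (out : Bool) : Decidable (Spec_looks_like_location_py val out) := by unfold Spec_looks_like_location_py; infer_instance

-- ===== CLAIM (what is proved, stated in full; the proofs are below) =====
def Claim_equal_looks_like_location_py : Prop := ∀ (val : String), Dom_looks_like_location_py val → Spec_looks_like_location_py val (looks_like_location_py val)

-- ===== LEMMAS AND PROOFS =====

-- B's position scan finds a keyword iff some (nonempty) keyword is an infix of the string
theorem pvScanLoc_eq_true_iff (kws : List (List Char)) (hne : ∀ kw ∈ kws, kw ≠ [])
    (l : List Char) : pvScanLoc kws l = true ↔ ∃ kw ∈ kws, kw <:+: l := by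
  induction l with
  | nil =>
      simp only [pvScanLoc, Bool.false_eq_true, false_iff, List.infix_nil]
      rintro ⟨kw, hmem, hkw⟩
      exact hne kw hmem hkw
  | cons c rest ih =>
      rw [pvScanLoc]
      by_cases h : kws.any (fun kw => PySem.Chars.startswith (c :: rest) kw) = true
      · simp only [h, if_true, true_iff]
        rcases List.any_eq_true.mp h with ⟨kw, hmem, hsw⟩
        exact ⟨kw, hmem, ((PySem.Chars.startswith_iff _ _).mp hsw).isInfix⟩
      · simp only [h, Bool.false_eq_true, if_false]
        rw [ih]
        constructor
        · rintro ⟨kw, hmem, hinf⟩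
          exact ⟨kw, hmem, List.infix_cons_iff.mpr (Or.inr hinf)⟩
        · rintro ⟨kw, hmem, hinf⟩
          rcases List.infix_cons_iff.mp hinf with hpre | hsuf
          · exact absurd (List.any_eq_true.mpr ⟨kw, hmem, (PySem.Chars.startswith_iff _ _).mpr hpre⟩) h
          · exact ⟨kw, hmem, hsuf⟩

-- ===== VERDICT (by name: the statement is the Claim_ definition above) =====
theorem looks_like_location_py_spec : Claim_equal_looks_like_location_py := by
  intro val _
  simp only [Spec_looks_like_location_py, looks_like_location_py, looks_like_location_py_alt,
    PySem.List.foldl_count_if, zero_add]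
  rw [Bool.eq_iff_iff, pvScanLoc_eq_true_iff _ (by decide), decide_eq_true_eq]
  constructor
  · intro h
    rcases List.countP_pos_iff.mp (by exact_mod_cast h) with ⟨kw, hmem, hp⟩
    exact ⟨kw.toList, List.mem_map.mpr ⟨kw, hmem, rfl⟩, (PySem.Str.isIn_iff_infix _ _).mp hp⟩
  · rintro ⟨kwl, hmeml, hinf⟩
    rcases List.mem_map.mp hmeml with ⟨kw, hmem, rfl⟩
    have : 0 < List.countP (fun keyword => PySem.Str.isIn keyword (PySem.Str.lower val)) pvKeywords :=
      List.countP_pos_iff.mpr ⟨kw, hmem, (PySem.Str.isIn_iff_infix _ _).mpr hinf⟩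
    exact_mod_cast this
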